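-- pv_equiv track=rewrite | github.com/Jun-jie-Huang/LoFI | src/llm_inference/dataset.py | get_continuous_ranges
-- ===== SOURCE A (Python) =====
-- def get_continuous_ranges(input_ids, label_index):
--     ranges = []
--     i = 0
--     n = len(input_ids)
--     while i < n:
--         if input_ids[i] != label_index:
--             i += 1
--             continue
--         j = i
--         while j < n and input_ids[j] == label_index:
--             j += 1
--         ranges.append((i, j))
--         i = j
--     return ranges
-- ===== SOURCE B (Python) =====
-- def get_continuous_ranges(input_ids, label_index):
--     ranges = []
--     start = None
--     for i, x in enumerate(input_ids):
--         if x == label_index: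
--             if start is None:
--                 start = i
--         else:
--             if start is not None:
--                 ranges.append((start, i))
--                 start = None
--     if start is not None:
--         ranges.append((start, len(input_ids)))
--     return ranges
-- ===== Notes on version B (the rewrite author's own statement) =====
-- stated objective: simpler
-- what changed: Replaced the nested while-loops with index jumping by a single enumerate pass maintaining an optional run start that is flushed at each run end (and after the loop).
import Mathlib
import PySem

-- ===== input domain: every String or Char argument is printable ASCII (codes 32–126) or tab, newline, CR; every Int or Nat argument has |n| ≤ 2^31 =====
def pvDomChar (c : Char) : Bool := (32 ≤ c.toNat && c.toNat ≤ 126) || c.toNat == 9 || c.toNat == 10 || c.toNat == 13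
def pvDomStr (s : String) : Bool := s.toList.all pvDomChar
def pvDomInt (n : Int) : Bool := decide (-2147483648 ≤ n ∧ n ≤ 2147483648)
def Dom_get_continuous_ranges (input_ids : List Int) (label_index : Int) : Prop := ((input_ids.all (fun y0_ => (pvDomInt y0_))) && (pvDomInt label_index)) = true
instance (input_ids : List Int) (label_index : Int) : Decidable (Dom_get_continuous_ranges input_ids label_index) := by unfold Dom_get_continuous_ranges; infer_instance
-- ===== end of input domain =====

-- B replaces A's nested while-loops (index jumping) by one enumerate pass with an optional run start.
-- ===== PORT A =====
-- inner while loop: 'while j < n and input_ids[j] == label_index: j += 1' (fuel only guards termination)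
def gcrJ (input_ids : List Int) (label_index : Int) (n : Nat) : Nat → Nat → Nat
  | 0, j => j
  | fuel + 1, j =>
    if j < n ∧ input_ids.getD j 0 = label_index then
      gcrJ input_ids label_index n fuel (j + 1)
    else j

-- outer while loop of A (fuel only guards termination: i strictly increases each step)
def gcrLoop (input_ids : List Int) (label_index : Int) (n : Nat) :
    Nat → Nat → List (Int × Int) → List (Int × Int)
  | 0, _, ranges => ranges
  | fuel + 1, i, ranges =>
    if i < n then
      if input_ids.getD i 0 ≠ label_index then
        gcrLoop input_ids label_index n fuel (i + 1) ranges
      else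
        let j := gcrJ input_ids label_index n (n - i) i
        gcrLoop input_ids label_index n fuel j (ranges ++ [((i : Int), (j : Int))])
    else ranges

def get_continuous_ranges (input_ids : List Int) (label_index : Int) : List (Int × Int) :=
  gcrLoop input_ids label_index input_ids.length (input_ids.length + 1) 0 []

-- ===== PORT B =====
-- one pass: 'for i, x in enumerate(input_ids)' carrying (start, ranges); flush at the end
def gcrAltLoop (label_index : Int) (xs : List Int) (i : Nat)
    (start : Option Nat) (ranges : List (Int × Int)) : List (Int × Int) :=
  match xs with
  | [] =>
    match start with
    | some s => ranges ++ [((s : Int), (i : Int))]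
    | none => ranges
  | x :: rest =>
    if x = label_index then
      match start with
      | none => gcrAltLoop label_index rest (i + 1) (some i) ranges
      | some s => gcrAltLoop label_index rest (i + 1) (some s) ranges
    else
      match start with
      | some s => gcrAltLoop label_index rest (i + 1) none (ranges ++ [((s : Int), (i : Int))])
      | none => gcrAltLoop label_index rest (i + 1) none ranges

def get_continuous_ranges_alt (input_ids : List Int) (label_index : Int) : List (Int × Int) :=
  gcrAltLoop label_index input_ids 0 none []

-- ===== PRECONDITION & SPEC =====
def Spec_get_continuous_ranges (input_ids : List Int) (label_index : Int) (out : List (Int × Int)) : Prop := out = get_continuous_ranges_alt input_ids label_index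
instance (input_ids : List Int) (label_index : Int) (out : List (Int × Int)) : Decidable (Spec_get_continuous_ranges input_ids label_index out) := by unfold Spec_get_continuous_ranges; infer_instance

-- ===== CLAIM (what is proved, stated in full; the proofs are below) =====
def Claim_equal_get_continuous_ranges : Prop := ∀ (input_ids : List Int) (label_index : Int), Dom_get_continuous_ranges input_ids label_index → Spec_get_continuous_ranges input_ids label_index (get_continuous_ranges input_ids label_index)

-- ===== LEMMAS AND PROOFS =====

theorem gcrJ_stop (input_ids : List Int) (label_index : Int) (n : Nat) (fuel j : Nat)
    (h : ¬ j < n) : gcrJ input_ids label_index n fuel j = j := by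
  cases fuel with
  | zero => rfl
  | succ f => rw [gcrJ, if_neg (by tauto)]

theorem gcrJ_ge (input_ids : List Int) (label_index : Int) (n : Nat) :
    ∀ (fuel j : Nat), j ≤ gcrJ input_ids label_index n fuel j := by
  intro fuel
  induction fuel with
  | zero => intro j; exact Nat.le_refl j
  | succ f ih =>
    intro j
    rw [gcrJ]
    split
    · exact Nat.le_trans (Nat.le_succ j) (ih (j + 1))
    · exact Nat.le_refl j

theorem gcrJ_le (input_ids : List Int) (label_index : Int) (n : Nat) :
    ∀ (fuel j : Nat), j ≤ n → gcrJ input_ids label_index n fuel j ≤ n := by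
  intro fuel
  induction fuel with
  | zero => intro j h; exact h
  | succ f ih =>
    intro j h
    rw [gcrJ]
    split
    · exact ih (j + 1) (by omega)
    · exact h

-- the inner loop's result does not depend on the fuel once the fuel covers n - j
theorem gcrJ_fuel (input_ids : List Int) (label_index : Int) (n : Nat) :
    ∀ (fuel fuel' j : Nat), n ≤ fuel + j → n ≤ fuel' + j →
      gcrJ input_ids label_index n fuel j = gcrJ input_ids label_index n fuel' j := by
  intro fuel
  induction fuel with
  | zero =>
    intro fuel' j h _
    rw [gcrJ_stop input_ids label_index n 0 j (by omega),
        gcrJ_stop input_ids label_index n fuel' j (by omega)]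
  | succ f ih =>
    intro fuel' j h h'
    cases fuel' with
    | zero =>
      rw [gcrJ_stop input_ids label_index n (f + 1) j (by omega),
          gcrJ_stop input_ids label_index n 0 j (by omega)]
    | succ f' =>
      rw [gcrJ, gcrJ]
      split
      · next hc => exact ih f' (j + 1) (by omega) (by omega)
      · rfl

-- the B pass from index i with an open run started at s: skip to the run's end j, flush (s, j)
theorem altLoop_some (input_ids : List Int) (label_index : Int) :
    ∀ (fuel i s : Nat) (ranges : List (Int × Int)),
      input_ids.length ≤ fuel + i →
      gcrAltLoop label_index (input_ids.drop i) i (some s) ranges =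
        gcrAltLoop label_index
          (input_ids.drop (gcrJ input_ids label_index input_ids.length (input_ids.length - i) i))
          (gcrJ input_ids label_index input_ids.length (input_ids.length - i) i) none
          (ranges ++ [((s : Int),
            ((gcrJ input_ids label_index input_ids.length (input_ids.length - i) i) : Int))]) := by
  intro fuel
  induction fuel with
  | zero =>
    intro i s ranges h
    have hge : ¬ i < input_ids.length := by omega
    rw [gcrJ_stop input_ids label_index input_ids.length _ i hge]
    have hd : input_ids.drop i = [] := List.drop_eq_nil_of_le (by omega)
    rw [hd, gcrAltLoop, gcrAltLoop]
  | succ f ih =>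
    intro i s ranges h
    by_cases hlt : i < input_ids.length
    · have hx : input_ids.drop i = input_ids[i] :: input_ids.drop (i + 1) :=
        List.drop_eq_getElem_cons hlt
      have hget : input_ids.getD i 0 = input_ids[i] := List.getD_eq_getElem input_ids 0 hlt
      obtain ⟨k, hk⟩ : ∃ k, input_ids.length - i = k + 1 := ⟨input_ids.length - i - 1, by omega⟩
      by_cases hxl : input_ids.getD i 0 = label_index
      · have hj : gcrJ input_ids label_index input_ids.length (input_ids.length - i) i
            = gcrJ input_ids label_index input_ids.length (input_ids.length - (i + 1)) (i + 1) := by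
          rw [hk, gcrJ, if_pos ⟨hlt, hxl⟩]
          exact gcrJ_fuel input_ids label_index input_ids.length k _ (i + 1) (by omega) (by omega)
        rw [hx, gcrAltLoop, if_pos (hget ▸ hxl), hj]
        exact ih (i + 1) s ranges (by omega)
      · have hj : gcrJ input_ids label_index input_ids.length (input_ids.length - i) i = i := by
          rw [hk, gcrJ, if_neg (by tauto)]
        rw [hx, gcrAltLoop, if_neg (hget ▸ hxl), hj]
        rw [hx, gcrAltLoop, if_neg (hget ▸ hxl)]
    · rw [gcrJ_stop input_ids label_index input_ids.length _ i hlt]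
      have hd : input_ids.drop i = [] := List.drop_eq_nil_of_le (by omega)
      rw [hd, gcrAltLoop, gcrAltLoop]

-- A's outer loop from index i equals the B pass over the remaining suffix with no open run
theorem loop_eq (input_ids : List Int) (label_index : Int) :
    ∀ (fuel i : Nat) (ranges : List (Int × Int)),
      i ≤ input_ids.length → input_ids.length < fuel + i →
      gcrLoop input_ids label_index input_ids.length fuel i ranges =
        gcrAltLoop label_index (input_ids.drop i) i none ranges := by
  intro fuel
  induction fuel with
  | zero => intro i ranges hi h; omega
  | succ f ih =>
    intro i ranges hi h
    by_cases hlt : i < input_ids.length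
    · have hx : input_ids.drop i = input_ids[i] :: input_ids.drop (i + 1) :=
        List.drop_eq_getElem_cons hlt
      have hget : input_ids.getD i 0 = input_ids[i] := List.getD_eq_getElem input_ids 0 hlt
      rw [gcrLoop, if_pos hlt]
      by_cases hxl : input_ids.getD i 0 = label_index
      · obtain ⟨k, hk⟩ : ∃ k, input_ids.length - i = k + 1 := ⟨input_ids.length - i - 1, by omega⟩
        have hge : i + 1 ≤ gcrJ input_ids label_index input_ids.length (input_ids.length - i) i := by
          rw [hk, gcrJ, if_pos ⟨hlt, hxl⟩]
          exact gcrJ_ge input_ids label_index input_ids.length k (i + 1)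
        have hle : gcrJ input_ids label_index input_ids.length (input_ids.length - i) i
            ≤ input_ids.length :=
          gcrJ_le input_ids label_index input_ids.length _ i (by omega)
        rw [if_neg (not_not.mpr hxl)]
        rw [hx, gcrAltLoop, if_pos (hget ▸ hxl)]
        rw [altLoop_some input_ids label_index (input_ids.length) (i + 1) i ranges (by omega)]
        have hj : gcrJ input_ids label_index input_ids.length (input_ids.length - (i + 1)) (i + 1)
            = gcrJ input_ids label_index input_ids.length (input_ids.length - i) i := by
          rw [hk, gcrJ, if_pos ⟨hlt, hxl⟩]
          exact (gcrJ_fuel input_ids label_index input_ids.length _ k (i + 1) (by omega) (by omega))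
        rw [hj]
        exact ih (gcrJ input_ids label_index input_ids.length (input_ids.length - i) i)
          (ranges ++ [((i : Int), _)]) hle (by omega)
      · rw [if_pos hxl]
        rw [hx, gcrAltLoop, if_neg (hget ▸ hxl)]
        exact ih (i + 1) ranges (by omega) (by omega)
    · have hd : input_ids.drop i = [] := List.drop_eq_nil_of_le (by omega)
      rw [gcrLoop, if_neg hlt, hd, gcrAltLoop]

-- ===== VERDICT (by name: the statement is the Claim_ definition above) =====
theorem get_continuous_ranges_spec : Claim_equal_get_continuous_ranges := by
  intro input_ids label_index _
  unfold Spec_get_continuous_ranges get_continuous_ranges get_continuous_ranges_alt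
  have := loop_eq input_ids label_index (input_ids.length + 1) 0 [] (by omega) (by omega)
  simpa using this
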